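-- pv_equiv track=rewrite | github.com/freingruber/JavaScript-Raider | modes/deterministic_preprocessing.py | get_code_before_pos_until_previous_newline
-- ===== SOURCE A (Python) =====
-- def get_code_before_pos_until_previous_newline(code, pos):
--     pos -= 1
--     tmp = ""
--     while True:
--         if pos < 0:
--             break
--         if code[pos] == "\n":
--             break
--         tmp += code[pos]
--         pos -= 1
--     return tmp[::-1].strip()    # reverse it because of backwards iteration in the loop
-- ===== SOURCE B (Python) =====
-- def get_code_before_pos_until_previous_newline(code, pos):
--     prefix = code[:max(0, pos)]
--     return prefix.rsplit('\n', 1)[-1].strip()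
-- ===== Notes on version B (the rewrite author's own statement) =====
-- stated objective: simpler
-- what changed: Replaces the backward char-by-char while loop (building a string one character at a time and reversing it) by slicing the prefix code[:pos] and taking the last '\n'-separated segment with rsplit, then stripping.
import Mathlib
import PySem

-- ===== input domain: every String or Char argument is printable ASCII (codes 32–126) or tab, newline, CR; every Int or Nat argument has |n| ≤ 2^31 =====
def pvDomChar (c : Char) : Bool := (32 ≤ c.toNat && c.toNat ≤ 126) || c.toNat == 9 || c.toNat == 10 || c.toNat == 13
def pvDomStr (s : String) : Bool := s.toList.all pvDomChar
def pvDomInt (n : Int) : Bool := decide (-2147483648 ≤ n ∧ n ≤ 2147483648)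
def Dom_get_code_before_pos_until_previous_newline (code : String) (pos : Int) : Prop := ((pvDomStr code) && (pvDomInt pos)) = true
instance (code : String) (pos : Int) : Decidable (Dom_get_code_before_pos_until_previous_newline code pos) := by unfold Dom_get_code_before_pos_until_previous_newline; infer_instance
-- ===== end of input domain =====

-- B replaces A's backward char-by-char accumulate-and-reverse loop by slicing the prefix and
-- taking its last newline-separated segment (simpler decomposition).

-- ===== PORT A =====
-- the while loop: walk pos down, collecting chars until a '\n' or the start of the string;
-- pyGet? = none is Python's IndexError (excluded by Pre_), the port just stops there.
def pvLoopA (code : List Char) (pos : Int) (tmp : List Char) : List Char :=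
  if pos < 0 then tmp
  else
    match PySem.List.pyGet? code pos with
    | none => tmp
    | some c => if c = '\n' then tmp else pvLoopA code (pos - 1) (tmp ++ [c])
termination_by (pos + 1).toNat
decreasing_by omega

def get_code_before_pos_until_previous_newline (code : String) (pos : Int) : String :=
  String.ofList (PySem.Chars.strip ((pvLoopA code.toList (pos - 1) []).reverse))

-- ===== PORT B =====
-- rsplit('\n', 1)[-1]: the part of cs after its last '\n', or cs itself when it has none
-- (exact for this call: the last piece of an rsplit on '\n' is the segment after the last '\n').
def pvLastSegment (cs : List Char) : List Char :=
  cs.foldl (fun acc c => if c = '\n' then [] else acc ++ [c]) []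

def get_code_before_pos_until_previous_newline_alt (code : String) (pos : Int) : String :=
  String.ofList (PySem.Chars.strip
    (pvLastSegment (PySem.List.slice code.toList none (some (max 0 pos)))))

-- ===== PRECONDITION & SPEC =====
-- A raises IndexError exactly when pos - 1 ≥ len(code), i.e. pos > len(code); nothing else is excluded.
def Pre_get_code_before_pos_until_previous_newline (code : String) (pos : Int) : Prop :=
  pos ≤ (code.toList.length : Int)
instance (code : String) (pos : Int) : Decidable (Pre_get_code_before_pos_until_previous_newline code pos) := by
  unfold Pre_get_code_before_pos_until_previous_newline; infer_instance

def pvWitness_get_code_before_pos_until_previous_newline : String × Int := ("a\nbc", 4)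

def Spec_get_code_before_pos_until_previous_newline (code : String) (pos : Int) (out : String) : Prop := out = get_code_before_pos_until_previous_newline_alt code pos
instance (code : String) (pos : Int) (out : String) : Decidable (Spec_get_code_before_pos_until_previous_newline code pos out) := by unfold Spec_get_code_before_pos_until_previous_newline; infer_instance

-- ===== CLAIM (what is proved, stated in full; the proofs are below) =====
def Claim_equal_get_code_before_pos_until_previous_newline : Prop := ∀ (code : String) (pos : Int), Dom_get_code_before_pos_until_previous_newline code pos → Pre_get_code_before_pos_until_previous_newline code pos → Spec_get_code_before_pos_until_previous_newline code pos (get_code_before_pos_until_previous_newline code pos)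

-- ===== LEMMAS AND PROOFS =====

-- the accumulator is only extended: running with tmp prepends tmp to the run from []
theorem pvLoopA_acc (code : List Char) :
    ∀ (n : Nat) (pos : Int), (pos + 1).toNat ≤ n → ∀ tmp,
      pvLoopA code pos tmp = tmp ++ pvLoopA code pos [] := by
  intro n
  induction n with
  | zero =>
      intro pos h tmp
      have hp : pos < 0 := by omega
      rw [pvLoopA, pvLoopA]; simp [hp]
  | succ n ih =>
      intro pos h tmp
      rw [pvLoopA]; conv_rhs => rw [pvLoopA]
      by_cases hp : pos < 0
      · simp [hp]
      · simp only [if_neg hp]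
        cases hg : PySem.List.pyGet? code pos with
        | none => simp
        | some c =>
          by_cases hc : c = '\n'
          · simp [hc]
          · simp only [if_neg hc]
            rw [ih (pos - 1) (by omega) (tmp ++ [c]), ih (pos - 1) (by omega) ([] ++ [c])]
            simp

-- core invariant: A's backward collection from position n-1, reversed, is the last
-- '\n'-separated segment of the first n characters
theorem pvKey (code : List Char) :
    ∀ n : Nat, n ≤ code.length →
      (pvLoopA code ((n : Int) - 1) []).reverse = pvLastSegment (code.take n) := by
  intro n
  induction n with
  | zero =>
      intro _
      rw [pvLoopA]
      norm_num [pvLastSegment]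
  | succ n ih =>
      intro h
      have hn : n < code.length := by omega
      have htake : code.take (n + 1) = code.take n ++ [code[n]] := by
        rw [List.take_add_one]
        simp [List.getElem?_eq_getElem hn]
      have hcast : ((n + 1 : Nat) : Int) - 1 = (n : Int) := by push_cast; ring
      rw [htake, hcast, pvLoopA]
      have hp : ¬ ((n : Int) < 0) := by omega
      simp only [if_neg hp, PySem.List.pyGet?_natCast, List.getElem?_eq_getElem hn]
      have hseg : ∀ c, pvLastSegment (code.take n ++ [c])
          = if c = '\n' then [] else pvLastSegment (code.take n) ++ [c] := by
        intro c
        by_cases hc : c = '\n' <;> simp [pvLastSegment, List.foldl_append, hc]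
      by_cases hc : code[n] = '\n'
      · simp [hc, hseg]
      · simp only [if_neg hc, hseg]
        rw [pvLoopA_acc code ((n : Int)).toNat ((n : Int) - 1) (by omega) ([] ++ [code[n]])]
        simp [ih (by omega)]

-- ===== VERDICT (by name: the statement is the Claim_ definition above) =====
theorem get_code_before_pos_until_previous_newline_spec : Claim_equal_get_code_before_pos_until_previous_newline := by
  intro code pos _ hpre
  unfold Spec_get_code_before_pos_until_previous_newline
  unfold get_code_before_pos_until_previous_newline get_code_before_pos_until_previous_newline_alt
  by_cases hp : pos ≤ 0
  · have hmax : max 0 pos = 0 := by omega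
    have hneg : pos - 1 < 0 := by omega
    rw [pvLoopA, hmax, PySem.List.slice_to code.toList (le_refl 0)]
    simp [hneg, pvLastSegment]
  · have h0 : 0 ≤ pos := by omega
    have hmax : max 0 pos = pos := by omega
    have hpos : pos = ((pos.toNat : Nat) : Int) := (Int.toNat_of_nonneg h0).symm
    rw [hmax, PySem.List.slice_to code.toList h0]
    rw [hpos, pvKey code.toList pos.toNat (by unfold Pre_get_code_before_pos_until_previous_newline at hpre; omega)]
    simp only [Int.toNat_natCast]
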